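-- pv_equiv track=rewrite | github.com/Valeria-Fadeeva/test-work | get-pages-from-scaned-book/vf_contour/digits.py | dict_int_range_search
-- ===== SOURCE A (Python) =====
-- def dict_int_range_search(d: dict, start: int, end: int) -> tuple | None:
--     k: list = []
--     v: list = []
--
--     for i in range(start, end):
--         if d.get(i) is None:
--             pass
--         else:
--             k.append(i)
--             v.append(d.get(i))
--
--     if len(v) > 0:
--         return k, v
--     else:
--         return None
-- ===== SOURCE B (Python) =====
-- def dict_int_range_search(d: dict, start: int, end: int) -> tuple | None:
--     ks = sorted(k for k in d if start <= k < end)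
--     if not ks:
--         return None
--     return ks, [d[k] for k in ks]
-- ===== Notes on version B (the rewrite author's own statement) =====
-- stated objective: alternative
-- what changed: Instead of scanning every integer i in range(start, end) and probing the dict twice per i, B iterates the dict's keys once, filters them to [start, end), and sorts them, then looks the values up; it trades the range scan for a sort of the matching keys.
import Mathlib
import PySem

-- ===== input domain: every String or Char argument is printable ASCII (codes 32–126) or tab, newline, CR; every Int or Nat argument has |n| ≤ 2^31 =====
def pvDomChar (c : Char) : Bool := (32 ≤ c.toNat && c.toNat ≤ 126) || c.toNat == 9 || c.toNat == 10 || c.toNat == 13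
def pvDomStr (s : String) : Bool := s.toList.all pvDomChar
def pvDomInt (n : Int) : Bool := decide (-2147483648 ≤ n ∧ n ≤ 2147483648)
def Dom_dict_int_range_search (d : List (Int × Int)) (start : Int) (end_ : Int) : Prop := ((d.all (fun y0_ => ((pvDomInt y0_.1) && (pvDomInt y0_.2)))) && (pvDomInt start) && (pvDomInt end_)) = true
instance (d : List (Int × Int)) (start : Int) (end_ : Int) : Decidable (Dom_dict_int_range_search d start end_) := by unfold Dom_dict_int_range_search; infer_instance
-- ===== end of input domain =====

-- B iterates the dict's keys, filters them to [start, end) and sorts them, instead of scanning every integer of the range (an alternative algorithm of similar measured cost).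

-- ===== PORT A =====
-- one iteration of A's for-loop body: d.get(i) is None → skip, else append i and d.get(i)
def dictIRS_step (d : List (Int × Int)) (acc : List Int × List Int) (i : Int) : List Int × List Int :=
  match d.lookup i with
  | none => acc
  | some x => (acc.1 ++ [i], acc.2 ++ [x])

def dict_int_range_search (d : List (Int × Int)) (start : Int) (end_ : Int) : Option (List Int × List Int) :=
  let kv := (PySem.List.pyRange start end_ 1).foldl (dictIRS_step d) ([], [])
  if 0 < kv.2.length then some (kv.1, kv.2) else none

-- ===== PORT B =====
def dict_int_range_search_alt (d : List (Int × Int)) (start : Int) (end_ : Int) : Option (List Int × List Int) :=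
  -- 'for k in d' iterates the dict's (distinct, insertion-ordered) keys
  let ks := PySem.List.sorted ((PySem.List.dedup (d.map Prod.fst)).filter (fun k => decide (start ≤ k) && decide (k < end_))) (fun x => x) false
  if ks = [] then none
  -- d[k] always succeeds for k a key of d, so the filterMap keeps every element
  else some (ks, ks.filterMap (fun k => d.lookup k))

-- ===== PRECONDITION & SPEC =====
def Spec_dict_int_range_search (d : List (Int × Int)) (start : Int) (end_ : Int) (out : Option (List Int × List Int)) : Prop := out = dict_int_range_search_alt d start end_
instance (d : List (Int × Int)) (start : Int) (end_ : Int) (out : Option (List Int × List Int)) : Decidable (Spec_dict_int_range_search d start end_ out) := by unfold Spec_dict_int_range_search; infer_instance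

-- ===== CLAIM (what is proved, stated in full; the proofs are below) =====
def Claim_equal_dict_int_range_search : Prop := ∀ (d : List (Int × Int)) (start : Int) (end_ : Int), Dom_dict_int_range_search d start end_ → Spec_dict_int_range_search d start end_ (dict_int_range_search d start end_)

-- ===== LEMMAS AND PROOFS =====

-- A's fold collects exactly the range elements whose lookup succeeds, with their values
theorem dictIRS_fold_char (d : List (Int × Int)) (L : List Int) (a b : List Int) :
    L.foldl (dictIRS_step d) (a, b) =
      (a ++ L.filter (fun i => (d.lookup i).isSome), b ++ L.filterMap (fun i => d.lookup i)) := by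
  induction L generalizing a b with
  | nil => simp
  | cons x t ih =>
    simp only [List.foldl_cons, dictIRS_step]
    cases h : d.lookup x with
    | none => simp [ih, h]
    | some v => simp [ih, h]

theorem lookup_isSome_iff (d : List (Int × Int)) (i : Int) :
    (d.lookup i).isSome = true ↔ i ∈ d.map Prod.fst := by
  induction d with
  | nil => simp
  | cons p t ih =>
    by_cases h : p.1 = i
    · simp [List.lookup, h]
    · have hne : (p.1 == i) = false := by simp [h]
      rw [List.lookup]
      simp only [beq_eq_false_iff_ne] at hne
      have : (i == p.1) = false := by simp [Ne.symm h]
      simp [this, ih]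
      intro he
      exact absurd he.symm h

theorem filterMap_eq_filter_filterMap (g : Int → Option Int) (L : List Int) :
    L.filterMap g = (L.filter (fun i => (g i).isSome)).filterMap g := by
  induction L with
  | nil => simp
  | cons x t ih =>
    cases h : g x with
    | none => simp [h, ih]
    | some v => simp [h, ih]

-- A's key list equals B's sorted filtered key list
theorem keys_eq (d : List (Int × Int)) (start end_ : Int) :
    PySem.List.sorted ((PySem.List.dedup (d.map Prod.fst)).filter (fun k => decide (start ≤ k) && decide (k < end_))) (fun x => x) false
      = (PySem.List.pyRange start end_ 1).filter (fun i => (d.lookup i).isSome) := by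
  apply PySem.List.sorted_eq_of_perm_of_pairwise_lt
  · rw [List.perm_ext_iff_of_nodup]
    · intro i
      simp only [List.mem_filter, PySem.List.mem_dedup, PySem.List.mem_pyRange_one,
        lookup_isSome_iff, Bool.and_eq_true, decide_eq_true_eq]
      tauto
    · exact (PySem.List.nodup_pyRange_one start end_).filter _
    · exact (PySem.List.nodup_dedup _).filter _
  · exact (PySem.List.pairwise_lt_pyRange_one start end_).sublist List.filter_sublist

theorem dict_int_range_search_spec : Claim_equal_dict_int_range_search := by
  intro d start end_ _
  unfold Spec_dict_int_range_search dict_int_range_search dict_int_range_search_alt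
  rw [dictIRS_fold_char, keys_eq]
  simp only [List.nil_append]
  rw [filterMap_eq_filter_filterMap]
  cases h : (PySem.List.pyRange start end_ 1).filter (fun i => (d.lookup i).isSome) with
  | nil => simp
  | cons k t =>
    have hk : (d.lookup k).isSome = true := by
      have := List.of_mem_filter (a := k) (l := PySem.List.pyRange start end_ 1)
        (by rw [h]; exact List.mem_cons_self)
      simpa using this
    cases hvk : d.lookup k with
    | none => rw [hvk] at hk; simp at hk
    | some v => simp [hvk]
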